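-- pv_equiv track=rewrite | github.com/rudranshsingh-02/TrainingNucleusteq | PythonCodingAssesment/StringManipulation/Q2.py | all_substrings
-- ===== SOURCE A (Python) =====
-- def all_substrings(s):
--     substrings = []
--     n = len(s)
--
--     for i in range(n):
--         for j in range(i + 1, n + 1):
--             sub = s[i:j]
--             if ' ' not in sub:
--                 substrings.append(sub)
--     return substrings
-- ===== SOURCE B (Python) =====
-- def _emit_substrings(word, out):
--     for i in range(len(word)):
--         for j in range(i + 1, len(word) + 1):
--             out.append(word[i:j])
--
--
-- def all_substrings(s):
--     # single pass: cut s into maximal space-free runs, emit each run's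
--     # substrings (start-major, then length) -- no membership scan needed
--     out = []
--     word = ""
--     for c in s:
--         if c == ' ':
--             _emit_substrings(word, out)
--             word = ""
--         else:
--             word += c
--     _emit_substrings(word, out)
--     return out
-- ===== Notes on version B (the rewrite author's own statement) =====
-- stated objective: alternative
-- what changed: Instead of enumerating all O(n^2) substrings of the whole string and scanning each for a space, B makes one pass that cuts s into maximal space-free runs and emits each run's substrings directly, so no membership test is ever performed.
import Mathlib
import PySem

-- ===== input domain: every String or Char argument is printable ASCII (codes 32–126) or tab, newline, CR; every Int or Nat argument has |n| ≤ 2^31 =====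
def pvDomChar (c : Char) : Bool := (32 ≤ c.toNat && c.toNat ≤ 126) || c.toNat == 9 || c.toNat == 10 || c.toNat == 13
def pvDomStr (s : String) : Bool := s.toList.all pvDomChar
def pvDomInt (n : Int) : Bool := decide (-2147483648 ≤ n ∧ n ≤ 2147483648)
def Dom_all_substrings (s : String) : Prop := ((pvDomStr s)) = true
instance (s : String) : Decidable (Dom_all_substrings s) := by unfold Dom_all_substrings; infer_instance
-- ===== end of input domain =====

-- B replaces A's "enumerate every substring of s and scan it for a space" by a single
-- pass that cuts s into maximal space-free runs and emits each run's substrings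
-- directly (alternative decomposition; same output list, in the same order).

-- ===== PORT A =====
def all_substrings (s : String) : List String :=
  let n : Int := PySem.Str.len s
  (PySem.List.pyRange 0 n 1).foldl (fun substrings i =>
    (PySem.List.pyRange (i + 1) (n + 1) 1).foldl (fun substrings j =>
      if !(PySem.Str.isIn " " (PySem.Str.slice s (some i) (some j)))
      then substrings ++ [PySem.Str.slice s (some i) (some j)] else substrings)
      substrings) []

-- ===== PORT B =====
-- helper _emit_substrings of Source B (out is passed and returned instead of mutated)
def pvEmitSubstrings (word : String) (out : List String) : List String :=
  let m : Int := PySem.Str.len word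
  (PySem.List.pyRange 0 m 1).foldl (fun out i =>
    (PySem.List.pyRange (i + 1) (m + 1) 1).foldl (fun out j =>
      out ++ [PySem.Str.slice word (some i) (some j)]) out) out

def all_substrings_alt (s : String) : List String :=
  let r := s.toList.foldl (fun (st : List String × String) c =>
    if c = ' ' then (pvEmitSubstrings st.2 st.1, "") else (st.1, st.2.push c))
    ([], "")
  pvEmitSubstrings r.2 r.1

-- ===== PRECONDITION & SPEC =====
def Spec_all_substrings (s : String) (out : List String) : Prop := out = all_substrings_alt s
instance (s : String) (out : List String) : Decidable (Spec_all_substrings s out) := by unfold Spec_all_substrings; infer_instance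

-- ===== CLAIM (what is proved, stated in full; the proofs are below) =====
def Claim_equal_all_substrings : Prop := ∀ (s : String), Dom_all_substrings s → Spec_all_substrings s (all_substrings s)

-- ===== LEMMAS AND PROOFS =====

-- nonempty space-free prefixes of l, in increasing length order
def pvPref (l : List Char) : List (List Char) :=
  ((List.range l.length).filter (fun d => decide (' ' ∉ l.take (d + 1)))).map
    (fun d => l.take (d + 1))

-- all space-free substrings of l, start-position-major (the common specification)
def pvS : List Char → List (List Char)
  | [] => []
  | c :: cs => pvPref (c :: cs) ++ pvS cs

theorem pvS_eq_flatMap (cs : List Char) :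
    pvS cs = (List.range cs.length).flatMap (fun k => pvPref (cs.drop k)) := by
  induction cs with
  | nil => simp [pvS]
  | cons c cs ih =>
    simp only [pvS, List.length_cons, List.range_succ_eq_map, List.flatMap_cons,
      List.flatMap_map, List.drop_zero]
    rw [ih]
    rfl

theorem pv_slice_eq (cs : List Char) (k d : Nat) :
    PySem.List.slice cs (some (k : Int)) (some ((k : Int) + 1 + (d : Int))) =
      (cs.drop k).take (d + 1) := by
  have h : ((k : Int) + 1 + (d : Int)) = ((k + (d + 1) : Nat) : Int) := by push_cast; ring
  rw [h, PySem.List.slice_natCast]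
  have h2 : k + (d + 1) - k = d + 1 := by omega
  rw [h2]

theorem pv_cond_eq (l : List Char) :
    (!(PySem.Chars.isIn [' '] l)) = decide (' ' ∉ l) := by
  cases h : PySem.Chars.isIn [' '] l with
  | true =>
    have hm : ' ' ∈ l :=
      (List.singleton_infix_iff ' ' l).mp ((PySem.Chars.isIn_iff_infix [' '] l).mp h)
    simp [hm]
  | false =>
    have hm : ' ' ∉ l := fun hmem =>
      (PySem.Chars.isIn_eq_false_iff [' '] l).mp h ((List.singleton_infix_iff ' ' l).mpr hmem)
    simp [hm]

-- A's inner loop at start position k produces exactly pvPref (cs.drop k)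
theorem pv_innerA (cs : List Char) (k : Nat) :
    ((PySem.List.pyRange ((k : Int) + 1) ((cs.length : Int) + 1) 1).filter
        (fun j => !(PySem.Chars.isIn [' '] (PySem.List.slice cs (some (k : Int)) (some j))))).map
      (fun j => PySem.List.slice cs (some (k : Int)) (some j)) =
    pvPref (cs.drop k) := by
  have hN : (((cs.length : Int) + 1) - ((k : Int) + 1)).toNat = cs.length - k := by omega
  rw [PySem.List.pyRange_one, hN, List.filter_map, List.map_map]
  have hf : ((fun j => PySem.List.slice cs (some (k : Int)) (some j)) ∘
      (fun d : Nat => (k : Int) + 1 + (d : Int))) =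
      (fun d : Nat => (cs.drop k).take (d + 1)) :=
    funext fun d => pv_slice_eq cs k d
  have hp : ((fun j => !(PySem.Chars.isIn [' '] (PySem.List.slice cs (some (k : Int)) (some j)))) ∘
      (fun d : Nat => (k : Int) + 1 + (d : Int))) =
      (fun d : Nat => decide (' ' ∉ (cs.drop k).take (d + 1))) := by
    funext d
    simp only [Function.comp_apply, pv_slice_eq, pv_cond_eq]
  rw [hf, hp]
  unfold pvPref
  rw [List.length_drop]

theorem pv_A_eq (s : String) :
    all_substrings s = (pvS s.toList).map String.ofList := by
  unfold all_substrings
  simp only [PySem.Str.len_eq]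
  have hinner : ∀ (i : Int) (acc : List String),
      (PySem.List.pyRange (i + 1) ((s.toList.length : Int) + 1) 1).foldl
        (fun substrings j =>
          if !(PySem.Str.isIn " " (PySem.Str.slice s (some i) (some j)))
          then substrings ++ [PySem.Str.slice s (some i) (some j)] else substrings) acc =
      acc ++ ((PySem.List.pyRange (i + 1) ((s.toList.length : Int) + 1) 1).filter
          (fun j => !(PySem.Str.isIn " " (PySem.Str.slice s (some i) (some j))))).map
        (fun j => PySem.Str.slice s (some i) (some j)) := fun i acc =>
    PySem.List.foldl_append_if _ _ _ acc
  simp only [hinner]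
  rw [PySem.List.foldl_append_eq_flatMap, List.nil_append, PySem.List.pyRange_one,
    List.flatMap_map]
  simp only [Int.sub_zero, Int.toNat_natCast, zero_add]
  rw [pvS_eq_flatMap, List.map_flatMap]
  congr 1
  funext k
  have hstr : ∀ j, PySem.Str.slice s (some (k : Int)) (some j) =
      String.ofList (PySem.List.slice s.toList (some (k : Int)) (some j)) := by
    intro j
    simp [PySem.Str.slice]
  have hsp : (" " : String).toList = [' '] := rfl
  have hbool : ∀ l : List Char, (!(PySem.Str.isIn " " (String.ofList l))) =
      (!(PySem.Chars.isIn [' '] l)) := by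
    intro l
    simp [PySem.Str.isIn, hsp]
  simp only [hstr, hbool]
  rw [show (fun j => String.ofList (PySem.List.slice s.toList (some (k : Int)) (some j))) =
      String.ofList ∘ (fun j => PySem.List.slice s.toList (some (k : Int)) (some j)) from rfl,
    ← List.map_map, pv_innerA s.toList k]

-- emitting a space-free word appends exactly that word's space-free substrings
theorem pv_emit_eq (w : String) (out : List String) (hw : ' ' ∉ w.toList) :
    pvEmitSubstrings w out = out ++ (pvS w.toList).map String.ofList := by
  unfold pvEmitSubstrings
  simp only [PySem.Str.len_eq, PySem.List.foldl_append_singleton_eq_map]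
  rw [PySem.List.foldl_append_eq_flatMap, PySem.List.pyRange_one, List.flatMap_map]
  simp only [Int.sub_zero, Int.toNat_natCast, zero_add]
  rw [pvS_eq_flatMap, List.map_flatMap]
  congr 1
  congr 1
  funext k
  have hN : (((w.toList.length : Int) + 1) - ((k : Int) + 1)).toNat = w.toList.length - k := by
    omega
  rw [PySem.List.pyRange_one, hN, List.map_map]
  have hf : ((fun j => PySem.Str.slice w (some (k : Int)) (some j)) ∘
      (fun d : Nat => (k : Int) + 1 + (d : Int))) =
      (fun d : Nat => String.ofList ((w.toList.drop k).take (d + 1))) := by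
    funext d
    simp only [Function.comp_apply, PySem.Str.slice, PySem.Chars.slice_eq_listSlice,
      pv_slice_eq]
  rw [hf]
  have hfilter : (List.range (w.toList.drop k).length).filter
      (fun d => decide (' ' ∉ (w.toList.drop k).take (d + 1))) =
      List.range (w.toList.drop k).length := by
    apply List.filter_eq_self.mpr
    intro d _
    simp only [decide_eq_true_eq]
    exact fun hmem => hw (List.mem_of_mem_drop (List.mem_of_mem_take hmem))
  unfold pvPref
  rw [hfilter, List.map_map, List.length_drop]
  rfl

theorem pvPref_append_space (w cs : List Char) :
    pvPref (w ++ ' ' :: cs) = pvPref w := by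
  unfold pvPref
  have hlen : (w ++ ' ' :: cs).length = w.length + (cs.length + 1) := by simp
  rw [hlen, List.range_add, List.filter_append, List.map_append]
  have h2 : List.filter (fun d => decide (' ' ∉ (w ++ ' ' :: cs).take (d + 1)))
      ((List.range (cs.length + 1)).map (fun x => w.length + x)) = [] := by
    apply List.filter_eq_nil_iff.mpr
    intro a ha
    obtain ⟨x, _, rfl⟩ := List.mem_map.mp ha
    have htake : (w ++ ' ' :: cs).take (w.length + x + 1) = w ++ ' ' :: cs.take x := by
      rw [List.take_append, List.take_of_length_le (by omega)]
      have hx : w.length + x + 1 - w.length = x + 1 := by omega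
      rw [hx]
      rfl
    simp [htake]
  rw [h2, List.map_nil, List.append_nil]
  have h1 : List.filter (fun d => decide (' ' ∉ (w ++ ' ' :: cs).take (d + 1)))
      (List.range w.length) =
      List.filter (fun d => decide (' ' ∉ w.take (d + 1))) (List.range w.length) := by
    apply List.filter_congr
    intro d hd
    rw [List.take_append_of_le_length (by simpa using List.mem_range.mp hd)]
  rw [h1]
  apply List.map_congr_left
  intro d hd
  have hd' : d + 1 ≤ w.length := by
    have := List.mem_range.mp (List.mem_of_mem_filter hd)
    omega
  rw [List.take_append_of_le_length hd']

theorem pvS_append_space (w cs : List Char) :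
    pvS (w ++ ' ' :: cs) = pvS w ++ pvS cs := by
  induction w with
  | nil =>
    have h : pvPref (' ' :: cs) = [] := by
      simpa using pvPref_append_space [] cs
    simp [pvS, h]
  | cons a w ih =>
    simp only [List.cons_append, pvS]
    rw [← List.cons_append, pvPref_append_space (a :: w) cs, ih]
    simp

theorem pv_B_inv (cs : List Char) (out : List String) (w : String) (hw : ' ' ∉ w.toList) :
    pvEmitSubstrings (cs.foldl (fun (st : List String × String) c =>
        if c = ' ' then (pvEmitSubstrings st.2 st.1, "") else (st.1, st.2.push c)) (out, w)).2
      (cs.foldl (fun (st : List String × String) c =>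
        if c = ' ' then (pvEmitSubstrings st.2 st.1, "") else (st.1, st.2.push c)) (out, w)).1 =
    out ++ (pvS (w.toList ++ cs)).map String.ofList := by
  induction cs generalizing out w with
  | nil => simpa using pv_emit_eq w out hw
  | cons c cs ih =>
    by_cases hc : c = ' '
    · subst hc
      simp only [List.foldl_cons, reduceIte]
      rw [ih (pvEmitSubstrings w out) "" (by simp), pv_emit_eq w out hw,
        pvS_append_space w.toList cs]
      simp
    · simp only [List.foldl_cons, if_neg hc]
      rw [ih out (w.push c)
        (by
          rw [String.toList_push]
          simp only [List.mem_append, List.mem_singleton]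
          rintro (h | h)
          · exact hw h
          · exact hc h.symm)]
      rw [String.toList_push]
      simp

-- ===== VERDICT (by name: the statement is the Claim_ definition above) =====
theorem all_substrings_spec : Claim_equal_all_substrings := by
  intro s _
  unfold Spec_all_substrings all_substrings_alt
  rw [pv_A_eq]
  have h := pv_B_inv s.toList [] "" (by simp)
  simp only [String.toList_empty, List.nil_append] at h
  exact h.symm
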